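-- pv_equiv track=rewrite | github.com/Elbouchouki/maze-heuristics | Main.py | optParse
-- ===== SOURCE A (Python) =====
-- def optParse(opts):
--     gridType = None
--     comparaison = None
--     algorithm = None
--     distance = None
--     toBeCompared = None
--     for opt, arg in opts:
--         if opt == '-g':
--             gridType = arg
--         if opt == '-c':
--             comparaison = arg
--         if opt == '-a':
--             algorithm = arg
--         if opt == '-d':
--             distance = arg
--         if opt == '-t':
--             toBeCompared = arg
--     return gridType, comparaison, algorithm, distance, toBeCompared
-- ===== SOURCE B (Python) =====
-- def optParse(opts):
--     def last(flag):
--         for opt, arg in reversed(opts):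
--             if opt == flag:
--                 return arg
--         return None
--     return last('-g'), last('-c'), last('-a'), last('-d'), last('-t')
-- ===== Notes on version B (the rewrite author's own statement) =====
-- stated objective: alternative
-- what changed: B replaces A's single forward pass with five accumulator variables by five independent backwards scans, each returning the first match of its flag in the reversed list (= last occurrence); no accumulators are maintained.
import Mathlib
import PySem

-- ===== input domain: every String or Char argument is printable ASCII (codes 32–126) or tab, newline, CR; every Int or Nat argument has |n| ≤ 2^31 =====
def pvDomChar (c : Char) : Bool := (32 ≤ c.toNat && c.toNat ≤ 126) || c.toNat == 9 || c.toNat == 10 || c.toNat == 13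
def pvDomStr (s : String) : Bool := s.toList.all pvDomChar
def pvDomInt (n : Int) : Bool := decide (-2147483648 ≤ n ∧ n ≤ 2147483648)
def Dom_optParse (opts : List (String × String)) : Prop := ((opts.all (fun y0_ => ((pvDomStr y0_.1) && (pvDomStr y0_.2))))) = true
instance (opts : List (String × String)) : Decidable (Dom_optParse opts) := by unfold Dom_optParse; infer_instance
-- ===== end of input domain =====

-- B answers each of the five flags with an independent backwards scan (first match in reversed(opts)) instead of A's one forward pass with five accumulators; objective: alternative, same O(n) cost.


-- ===== PORT A =====
-- the for-loop with its five accumulator variables, one if per flag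
def optParseGo : List (String × String) → Option String → Option String → Option String → Option String → Option String →
    Option String × Option String × Option String × Option String × Option String
  | [], g, c, a, d, t => (g, c, a, d, t)
  | (opt, arg) :: rest, g, c, a, d, t =>
    let g := if opt == "-g" then some arg else g
    let c := if opt == "-c" then some arg else c
    let a := if opt == "-a" then some arg else a
    let d := if opt == "-d" then some arg else d
    let t := if opt == "-t" then some arg else t
    optParseGo rest g c a d t

def optParse (opts : List (String × String)) : Option String × Option String × Option String × Option String × Option String :=
  optParseGo opts none none none none none

-- ===== PORT B =====
-- B's `last(flag)`: walk reversed(opts), return the arg of the first pair whose key is flag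
def lastFlag (flag : String) : List (String × String) → Option String
  | [] => none
  | (o, a) :: rest => if o == flag then some a else lastFlag flag rest

def optParse_alt (opts : List (String × String)) : Option String × Option String × Option String × Option String × Option String :=
  let r := opts.reverse
  (lastFlag "-g" r, lastFlag "-c" r, lastFlag "-a" r, lastFlag "-d" r, lastFlag "-t" r)

-- ===== PRECONDITION & SPEC =====
def Spec_optParse (opts : List (String × String)) (out : Option String × Option String × Option String × Option String × Option String) : Prop := out = optParse_alt opts
instance (opts : List (String × String)) (out : Option String × Option String × Option String × Option String × Option String) : Decidable (Spec_optParse opts out) := by unfold Spec_optParse; infer_instance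

-- ===== CLAIM (what is proved, stated in full; the proofs are below) =====
def Claim_equal_optParse : Prop := ∀ (opts : List (String × String)), Dom_optParse opts → Spec_optParse opts (optParse opts)

-- ===== LEMMAS AND PROOFS =====

-- ===== VERDICT (by name: the statement is the Claim_ definition above) =====
lemma lastFlag_append (flag : String) (l1 l2 : List (String × String)) :
    lastFlag flag (l1 ++ l2) = (lastFlag flag l1).orElse (fun _ => lastFlag flag l2) := by
  induction l1 with
  | nil => simp [lastFlag]
  | cons p rest ih =>
    obtain ⟨o, a⟩ := p
    by_cases h : o == flag <;> simp [lastFlag, h, ih]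

lemma optParseGo_eq (opts : List (String × String)) :
    ∀ (g c a d t : Option String),
      optParseGo opts g c a d t =
        ((lastFlag "-g" opts.reverse).orElse (fun _ => g),
         (lastFlag "-c" opts.reverse).orElse (fun _ => c),
         (lastFlag "-a" opts.reverse).orElse (fun _ => a),
         (lastFlag "-d" opts.reverse).orElse (fun _ => d),
         (lastFlag "-t" opts.reverse).orElse (fun _ => t)) := by
  induction opts with
  | nil => intro g c a d t; simp [optParseGo, lastFlag]
  | cons p rest ih =>
    intro g c a d t
    obtain ⟨o, v⟩ := p
    show optParseGo rest _ _ _ _ _ = _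
    rw [ih]
    have h : ∀ (flag : String) (x : Option String),
        (lastFlag flag rest.reverse).orElse (fun _ => if o == flag then some v else x) =
        (lastFlag flag ((o, v) :: rest).reverse).orElse (fun _ => x) := by
      intro flag x
      simp only [List.reverse_cons, lastFlag_append]
      by_cases h1 : lastFlag flag rest.reverse = none <;>
        by_cases h2 : o == flag <;>
        cases hx : lastFlag flag rest.reverse <;>
        simp_all [lastFlag, Option.orElse]
    simp only [h]

-- ===== VERDICT (by name: the statement is the Claim_ definition above) =====
theorem optParse_spec : Claim_equal_optParse := by
  intro opts _
  show optParse opts = optParse_alt opts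
  refine Prod.ext ?_ (Prod.ext ?_ (Prod.ext ?_ (Prod.ext ?_ ?_))) <;>
    simp [optParse, optParse_alt, optParseGo_eq, Option.orElse] <;>
    (cases lastFlag _ opts.reverse <;> simp)
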